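-- pv_equiv track=rewrite | github.com/leej11/advent-of-code-2021 | day2/day2.py | part2_instruction_parsing
-- ===== SOURCE A (Python) =====
-- def part2_instruction_parsing(instructions, h, d, a):
--
--     for instruction in instructions:
--         if instruction[0] == 'forward':
--             h += instruction[1]
--             d += instruction[1] * a
--         elif instruction[0] == 'down':
--             a += instruction[1]
--         elif instruction[0] == 'up':
--             a -= instruction[1]
--
--     return h, d, a
-- ===== SOURCE B (Python) =====
-- def part2_instruction_parsing(instructions, h, d, a):
--     # Pass 1: aim in effect BEFORE each instruction (forwards leave aim unchanged).
--     deltas = [amt if cmd == 'down' else (-amt if cmd == 'up' else 0)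
--               for cmd, amt in instructions]
--     aims = []
--     aim = a
--     for dl in deltas:
--         aims.append(aim)
--         aim += dl
--     # Pass 2: accumulate forwards against the precomputed aim table.
--     h += sum(amt for (cmd, amt), _ in zip(instructions, aims) if cmd == 'forward')
--     d += sum(amt * ai for (cmd, amt), ai in zip(instructions, aims) if cmd == 'forward')
--     return h, d, aim
-- ===== Notes on version B (the rewrite author's own statement) =====
-- stated objective: alternative
-- what changed: Replaces A's single fused fold over (h,d,a) with a two-pass decomposition: first a prefix-table pass computing the aim in effect before each instruction, then an accumulation pass summing forward amounts and amount*aim against that table.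
import Mathlib
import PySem

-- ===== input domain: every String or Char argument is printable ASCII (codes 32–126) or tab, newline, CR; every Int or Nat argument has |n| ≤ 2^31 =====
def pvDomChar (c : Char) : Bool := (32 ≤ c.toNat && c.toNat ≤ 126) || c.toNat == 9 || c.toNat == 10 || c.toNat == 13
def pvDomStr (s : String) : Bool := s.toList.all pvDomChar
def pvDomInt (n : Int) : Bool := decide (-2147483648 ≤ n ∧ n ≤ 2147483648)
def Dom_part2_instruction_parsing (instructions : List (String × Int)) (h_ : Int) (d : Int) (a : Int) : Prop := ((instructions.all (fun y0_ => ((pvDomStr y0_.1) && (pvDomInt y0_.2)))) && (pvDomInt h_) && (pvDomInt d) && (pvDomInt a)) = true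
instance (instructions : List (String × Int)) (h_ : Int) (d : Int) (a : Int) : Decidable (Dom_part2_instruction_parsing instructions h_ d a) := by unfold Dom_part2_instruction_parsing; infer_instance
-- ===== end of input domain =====

-- B replaces A's fused single fold with a two-pass decomposition (prefix aim table, then accumulation); alternative structure, same O(n) cost.

-- ===== PORT A =====
def part2_instruction_parsing (instructions : List (String × Int)) (h_ : Int) (d : Int) (a : Int) : Int × Int × Int :=
  instructions.foldl
    (fun (s : Int × Int × Int) ins =>
      if ins.1 == "forward" then (s.1 + ins.2, s.2.1 + ins.2 * s.2.2, s.2.2)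
      else if ins.1 == "down" then (s.1, s.2.1, s.2.2 + ins.2)
      else if ins.1 == "up" then (s.1, s.2.1, s.2.2 - ins.2)
      else s)
    (h_, d, a)

-- ===== PORT B =====
-- deltas list comprehension
def pvDelta (p : String × Int) : Int :=
  if p.1 == "down" then p.2 else if p.1 == "up" then -p.2 else 0

-- the `for dl in deltas` loop: state (aims, aim), append then add
def pvAims (deltas : List Int) (a : Int) : List Int × Int :=
  deltas.foldl (fun (s : List Int × Int) dl => (s.1 ++ [s.2], s.2 + dl)) ([], a)

def part2_instruction_parsing_alt (instructions : List (String × Int)) (h_ : Int) (d : Int) (a : Int) : Int × Int × Int :=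
  let deltas := instructions.map pvDelta
  let p := pvAims deltas a
  let z := instructions.zip p.1
  let h := h_ + z.foldl (fun s q => if q.1.1 == "forward" then s + q.1.2 else s) 0
  let d' := d + z.foldl (fun s q => if q.1.1 == "forward" then s + q.1.2 * q.2 else s) 0
  (h, d', p.2)

-- ===== PRECONDITION & SPEC =====
def Spec_part2_instruction_parsing (instructions : List (String × Int)) (h_ : Int) (d : Int) (a : Int) (out : Int × Int × Int) : Prop := out = part2_instruction_parsing_alt instructions h_ d a
instance (instructions : List (String × Int)) (h_ : Int) (d : Int) (a : Int) (out : Int × Int × Int) : Decidable (Spec_part2_instruction_parsing instructions h_ d a out) := by unfold Spec_part2_instruction_parsing; infer_instance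

-- ===== CLAIM (what is proved, stated in full; the proofs are below) =====
def Claim_equal_part2_instruction_parsing : Prop := ∀ (instructions : List (String × Int)) (h_ : Int) (d : Int) (a : Int), Dom_part2_instruction_parsing instructions h_ d a → Spec_part2_instruction_parsing instructions h_ d a (part2_instruction_parsing instructions h_ d a)

-- ===== LEMMAS AND PROOFS =====

-- the aims-loop with a pre-filled accumulator prepends it
theorem pvAims_accum (deltas : List Int) (pre : List Int) (a : Int) :
    deltas.foldl (fun (s : List Int × Int) dl => (s.1 ++ [s.2], s.2 + dl)) (pre, a)
      = (pre ++ (pvAims deltas a).1, (pvAims deltas a).2) := by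
  induction deltas generalizing pre a with
  | nil => simp [pvAims]
  | cons dl ds ih =>
    simp only [pvAims, List.foldl_cons, List.nil_append]
    rw [ih (pre ++ [a]) (a + dl), ih [a] (a + dl)]
    simp [pvAims]

theorem pvAims_cons (dl : Int) (ds : List Int) (a : Int) :
    pvAims (dl :: ds) a = (a :: (pvAims ds (a + dl)).1, (pvAims ds (a + dl)).2) := by
  simp only [pvAims, List.foldl_cons, List.nil_append]
  rw [pvAims_accum ds [a] (a + dl)]
  simp [pvAims]

-- shift the initial accumulator out of a conditional-sum foldl
theorem foldl_sum_shift (f : (String × Int) × Int → Int) (c : (String × Int) × Int → Bool)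
    (z : List ((String × Int) × Int)) (x : Int) :
    z.foldl (fun s q => if c q then s + f q else s) x
      = x + z.foldl (fun s q => if c q then s + f q else s) 0 := by
  induction z generalizing x with
  | nil => simp
  | cons q z ih =>
    simp only [List.foldl_cons]
    rw [ih, ih (if c q then 0 + f q else 0)]
    split <;> ring

-- cons step of the conditional sums in B
theorem csum_cons (f : (String × Int) × Int → Int) (c : (String × Int) × Int → Bool)
    (q : (String × Int) × Int) (z : List ((String × Int) × Int)) :
    (q :: z).foldl (fun s q => if c q then s + f q else s) 0
      = (if c q then f q else 0) + z.foldl (fun s q => if c q then s + f q else s) 0 := by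
  simp only [List.foldl_cons]
  rw [foldl_sum_shift]
  split <;> ring

theorem part2_main (instructions : List (String × Int)) (h_ d a : Int) :
    part2_instruction_parsing instructions h_ d a
      = part2_instruction_parsing_alt instructions h_ d a := by
  induction instructions generalizing h_ d a with
  | nil => simp [part2_instruction_parsing, part2_instruction_parsing_alt, pvAims]
  | cons ins rest ih =>
    obtain ⟨cmd, amt⟩ := ins
    by_cases hf : cmd = "forward"
    · subst hf
      have e1 : part2_instruction_parsing (("forward", amt) :: rest) h_ d a
          = part2_instruction_parsing rest (h_ + amt) (d + amt * a) a := by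
        simp [part2_instruction_parsing]
      rw [e1, ih]
      simp only [part2_instruction_parsing_alt, List.map_cons, pvDelta, pvAims_cons,
        List.zip_cons_cons]
      rw [csum_cons, csum_cons]
      simp
      constructor <;> ring
    · have hfb : (cmd == "forward") = false := beq_eq_false_iff_ne.mpr hf
      by_cases hd : cmd = "down"
      · subst hd
        have e1 : part2_instruction_parsing (("down", amt) :: rest) h_ d a
            = part2_instruction_parsing rest h_ d (a + amt) := by
          simp [part2_instruction_parsing]
        rw [e1, ih]
        simp only [part2_instruction_parsing_alt, List.map_cons, pvDelta, pvAims_cons,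
          List.zip_cons_cons]
        rw [csum_cons, csum_cons]
        simp
      · have hdb : (cmd == "down") = false := beq_eq_false_iff_ne.mpr hd
        by_cases hu : cmd = "up"
        · subst hu
          have e1 : part2_instruction_parsing (("up", amt) :: rest) h_ d a
              = part2_instruction_parsing rest h_ d (a - amt) := by
            simp [part2_instruction_parsing]
          rw [e1, ih]
          simp only [part2_instruction_parsing_alt, List.map_cons, pvDelta, pvAims_cons,
            List.zip_cons_cons]
          rw [csum_cons, csum_cons]
          simp [sub_eq_add_neg]
        · have hub : (cmd == "up") = false := beq_eq_false_iff_ne.mpr hu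
          have e1 : part2_instruction_parsing ((cmd, amt) :: rest) h_ d a
              = part2_instruction_parsing rest h_ d a := by
            simp [part2_instruction_parsing, hf, hd, hu]
          rw [e1, ih]
          simp only [part2_instruction_parsing_alt, List.map_cons, pvDelta, pvAims_cons,
            List.zip_cons_cons]
          rw [csum_cons, csum_cons]
          simp [hfb, hdb, hub]

-- ===== VERDICT (by name: the statement is the Claim_ definition above) =====
theorem part2_instruction_parsing_spec : Claim_equal_part2_instruction_parsing := by
  intro instructions h_ d a _
  unfold Spec_part2_instruction_parsing
  exact part2_main instructions h_ d a
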